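-- pv_equiv track=rewrite | github.com/j2755/cipher | cipher.py | caesarCipherKey
-- ===== SOURCE A (Python) =====
-- def caesarCipherKey(offset=0):
--     key = {}
--     alphabet = 'ABCDEFGHIJKLMNOPQRSTUVWXYZ'
--     for letter in alphabet:
--         caesar_index = alphabet.index(letter)+offset
--         caesar_index = caesar_index % len(alphabet)
--         key.update({letter: alphabet[caesar_index]})
--     return key
-- ===== SOURCE B (Python) =====
-- def caesarCipherKey(offset=0):
--     alphabet = 'ABCDEFGHIJKLMNOPQRSTUVWXYZ'
--     k = offset % len(alphabet)
--     shifted = alphabet[k:] + alphabet[:k]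
--     return dict(zip(alphabet, shifted))
-- ===== Notes on version B (the rewrite author's own statement) =====
-- stated objective: simpler
-- what changed: B normalizes the offset once, rotates the alphabet with two slices, and zips it against the original alphabet, instead of A's per-letter index scan plus per-letter modular arithmetic.
import Mathlib
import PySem

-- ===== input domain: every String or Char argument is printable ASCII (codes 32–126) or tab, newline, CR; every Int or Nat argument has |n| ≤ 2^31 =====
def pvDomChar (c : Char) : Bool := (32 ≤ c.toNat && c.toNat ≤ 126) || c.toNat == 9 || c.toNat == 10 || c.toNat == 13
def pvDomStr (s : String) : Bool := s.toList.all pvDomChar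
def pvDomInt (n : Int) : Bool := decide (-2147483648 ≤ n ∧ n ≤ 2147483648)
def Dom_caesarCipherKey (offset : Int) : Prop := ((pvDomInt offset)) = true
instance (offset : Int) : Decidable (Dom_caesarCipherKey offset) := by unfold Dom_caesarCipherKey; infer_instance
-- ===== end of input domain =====

-- B builds the mapping by rotating the alphabet once with slicing and zipping, instead of A's
-- per-letter index scan and modular arithmetic; same return value, proved equal for all offsets.


-- ===== PORT A =====
-- literal transliteration of A: for each letter, caesar_index = alphabet.index(letter)+offset,
-- reduced mod 26, and key.update({letter: alphabet[caesar_index]}).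
-- alphabet.index(letter) is ported as PySem.Str.find (the letter is always present, so index == find);
-- alphabet[caesar_index] via PySem.Str.pyGet? with a .getD 'A' default that is unreachable (0 ≤ index < 26).
-- the loop body of A, one iteration of 'for letter in alphabet'
def caesarStep (offset : Int) (key : PySem.Dict String String) (letter : Char) : PySem.Dict String String :=
  key.insert (String.ofList [letter])
    (String.ofList [(PySem.Str.pyGet? "ABCDEFGHIJKLMNOPQRSTUVWXYZ"
      (PySem.Int.mod (PySem.Str.find "ABCDEFGHIJKLMNOPQRSTUVWXYZ" (String.ofList [letter]) + offset)
        (PySem.Str.len "ABCDEFGHIJKLMNOPQRSTUVWXYZ"))).getD 'A'])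

def caesarCipherKey (offset : Int) : List (String × String) :=
  ("ABCDEFGHIJKLMNOPQRSTUVWXYZ".toList.foldl (caesarStep offset) PySem.Dict.empty).items

-- ===== PORT B =====
-- literal transliteration of B: k = offset % 26; shifted = alphabet[k:] + alphabet[:k]; dict(zip(alphabet, shifted)).
-- shifted = alphabet[k:] + alphabet[:k], k = offset % len(alphabet)
def caesarShifted (offset : Int) : List Char :=
  PySem.List.slice "ABCDEFGHIJKLMNOPQRSTUVWXYZ".toList
      (some (PySem.Int.mod offset (PySem.Str.len "ABCDEFGHIJKLMNOPQRSTUVWXYZ"))) none ++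
    PySem.List.slice "ABCDEFGHIJKLMNOPQRSTUVWXYZ".toList none
      (some (PySem.Int.mod offset (PySem.Str.len "ABCDEFGHIJKLMNOPQRSTUVWXYZ")))

def caesarCipherKey_alt (offset : Int) : List (String × String) :=
  (PySem.Dict.ofList (("ABCDEFGHIJKLMNOPQRSTUVWXYZ".toList.zip (caesarShifted offset)).map
      (fun p => (String.ofList [p.1], String.ofList [p.2])))).items

-- ===== PRECONDITION & SPEC =====
def Spec_caesarCipherKey (offset : Int) (out : List (String × String)) : Prop := out = caesarCipherKey_alt offset
instance (offset : Int) (out : List (String × String)) : Decidable (Spec_caesarCipherKey offset out) := by unfold Spec_caesarCipherKey; infer_instance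

-- ===== CLAIM (what is proved, stated in full; the proofs are below) =====
def Claim_equal_caesarCipherKey : Prop := ∀ (offset : Int), Dom_caesarCipherKey offset → Spec_caesarCipherKey offset (caesarCipherKey offset)

-- ===== LEMMAS AND PROOFS =====

-- A depends only on offset mod 26.
theorem caesarStep_mod (o : Int) : caesarStep o = caesarStep (PySem.Int.mod o 26) := by
  funext key letter
  unfold caesarStep
  rw [show PySem.Str.len "ABCDEFGHIJKLMNOPQRSTUVWXYZ" = (26 : Int) from rfl]
  simp only [PySem.Int.mod_eq_emod_of_pos (show (0:Int) < 26 by norm_num)]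
  have h : ∀ n : Int, (n + o) % 26 = (n + o % 26) % 26 := by intro n; omega
  rw [h]

-- A depends only on offset mod 26.
theorem caesarCipherKey_mod (o : Int) :
    caesarCipherKey o = caesarCipherKey (PySem.Int.mod o 26) := by
  unfold caesarCipherKey
  rw [caesarStep_mod]

-- B depends only on offset mod 26.
theorem caesarCipherKey_alt_mod (o : Int) :
    caesarCipherKey_alt o = caesarCipherKey_alt (PySem.Int.mod o 26) := by
  unfold caesarCipherKey_alt caesarShifted
  rw [show PySem.Str.len "ABCDEFGHIJKLMNOPQRSTUVWXYZ" = (26 : Int) from rfl]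
  simp only [PySem.Int.mod_eq_emod_of_pos (show (0:Int) < 26 by norm_num)]
  have h : o % 26 % 26 = o % 26 := by omega
  rw [h]

-- ===== VERDICT (by name: the statement is the Claim_ definition above) =====
theorem caesarCipherKey_spec : Claim_equal_caesarCipherKey := by
  intro o _
  unfold Spec_caesarCipherKey
  rw [caesarCipherKey_mod o, caesarCipherKey_alt_mod o]
  have h0 : 0 ≤ PySem.Int.mod o 26 := PySem.Int.mod_nonneg o (by norm_num)
  have h1 : PySem.Int.mod o 26 < 26 := PySem.Int.mod_lt o (by norm_num)
  generalize PySem.Int.mod o 26 = r at h0 h1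
  interval_cases r <;> decide
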